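-- pv_equiv track=rewrite | github.com/teddyy279/Python | Sắp xếp - Tìm kiếm/Problem24 Biểu thức nhỏ nhất.py | solve
-- ===== SOURCE A (Python) =====
-- def solve(a, n, x):
--     res = 0
--     tmp1 = x
--     for i in range(len(a)):
--         if(tmp1 >= 1):
--             res -= a[i]
--             tmp1 -= 1
--         else:
--             res += a[i]
--     return res
-- ===== SOURCE B (Python) =====
-- def solve(a, n, x):
--     k = min(max(x, 0), len(a))
--     return sum(a) - 2 * sum(a[:k])
-- ===== Notes on version B (the rewrite author's own statement) =====
-- stated objective: simpler
-- what changed: Replaces the per-element if/else counter loop by a closed split: total sum minus twice the sum of the clamped x-prefix (k = min(max(x,0), len(a))).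
import Mathlib
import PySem

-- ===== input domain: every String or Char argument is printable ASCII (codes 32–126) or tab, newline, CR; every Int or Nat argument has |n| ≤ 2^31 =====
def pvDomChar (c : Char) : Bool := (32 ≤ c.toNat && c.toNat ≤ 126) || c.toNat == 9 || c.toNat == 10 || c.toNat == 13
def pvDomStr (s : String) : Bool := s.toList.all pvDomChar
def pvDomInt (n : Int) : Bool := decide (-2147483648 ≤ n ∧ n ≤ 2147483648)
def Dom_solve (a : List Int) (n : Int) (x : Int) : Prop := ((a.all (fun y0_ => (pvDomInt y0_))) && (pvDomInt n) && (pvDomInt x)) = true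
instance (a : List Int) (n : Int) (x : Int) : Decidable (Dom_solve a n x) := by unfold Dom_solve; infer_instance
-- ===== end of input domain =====

-- ===== PORT A =====
-- Port of A: single loop over a carrying (res, tmp1), branching on tmp1 ≥ 1.
def solve (a : List Int) (n : Int) (x : Int) : Int :=
  (a.foldl (fun (s : Int × Int) ai =>
      if s.2 ≥ 1 then (s.1 - ai, s.2 - 1) else (s.1 + ai, s.2)) (0, x)).1

-- ===== PORT B =====
-- Port of B: total sum minus twice the sum of the clamped-x prefix.
def solve_alt (a : List Int) (n : Int) (x : Int) : Int :=
  let k : Int := min (max x 0) (a.length : Int)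
  a.sum - 2 * (a.take k.toNat).sum

-- ===== PRECONDITION & SPEC =====
def Spec_solve (a : List Int) (n : Int) (x : Int) (out : Int) : Prop := out = solve_alt a n x
instance (a : List Int) (n : Int) (x : Int) (out : Int) : Decidable (Spec_solve a n x out) := by unfold Spec_solve; infer_instance

-- ===== CLAIM (what is proved, stated in full; the proofs are below) =====
def Claim_equal_solve : Prop := ∀ (a : List Int) (n : Int) (x : Int), Dom_solve a n x → Spec_solve a n x (solve a n x)

-- ===== LEMMAS AND PROOFS =====

-- ===== VERDICT (by name: the statement is the Claim_ definition above) =====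
theorem loop_eq (a : List Int) : ∀ (r x : Int),
    (a.foldl (fun (s : Int × Int) ai =>
      if s.2 ≥ 1 then (s.1 - ai, s.2 - 1) else (s.1 + ai, s.2)) (r, x)).1
    = r + a.sum - 2 * (a.take (min (max x 0) (a.length : Int)).toNat).sum := by
  induction a with
  | nil => intro r x; simp
  | cons h t ih =>
    intro r x
    by_cases hx : x ≥ 1
    · have hk : (min (max x 0) ((h :: t).length : Int)).toNat
          = (min (max (x - 1) 0) (t.length : Int)).toNat + 1 := by
        simp only [List.length_cons]; push_cast; omega
      simp only [List.foldl_cons, if_pos hx, ih, hk, List.take_succ_cons,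
        List.sum_cons]
      ring
    · have hk : (min (max x 0) ((h :: t).length : Int)).toNat = 0 := by omega
      have hk' : (min (max x 0) (t.length : Int)).toNat = 0 := by omega
      simp only [List.foldl_cons, if_neg hx, ih, hk, hk', List.take_zero,
        List.sum_nil, List.sum_cons]
      ring

theorem solve_spec : Claim_equal_solve := by
  intro a n x _
  show solve a n x = solve_alt a n x
  simp only [solve, solve_alt, loop_eq]
  ring
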